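-- pv_equiv track=rewrite | github.com/melanatech/data-analysis | sentiment_analysis.py | modify_token
-- ===== SOURCE A (Python) =====
-- negation = ['no','not','never','n\'t','cannot']
--
-- intensify = ['very','really','extremely','absolutely','highly']
--
-- def modify_token(lst):
--     list1 = [v.lower() for v in lst]
--     list2 = [n for n in negation if n in list1]
--     list3 = [n for n in intensify if n in list1]
--     list4 = [n for n in list1 if n=='would']
--     tagg_id = 'negate'
--     taggg_id = 'intense'
--     tagggg_id = 'recs'
--     if len(list2)==1: tagg = 2
--     elif len(list2)!=1: tagg = 0
--     if len(list3)>0: taggg = 1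
--     elif len(list3)==0: taggg = 0
--     if len(list4)>0: tagggg = 0
--     elif len(list4)==0: tagggg = 1
--     return tagg_id,tagg,taggg_id,taggg,tagggg_id,tagggg
-- ===== SOURCE B (Python) =====
-- negation = ['no','not','never','n\'t','cannot']
--
-- intensify = ['very','really','extremely','absolutely','highly']
--
-- def modify_token(lst):
--     found_neg = set()
--     has_intense = False
--     has_would = False
--     for v in lst:
--         w = v.lower()
--         if w in negation:
--             found_neg.add(w)
--         if w in intensify:
--             has_intense = True
--         if w == 'would':
--             has_would = True
--     return ('negate', 2 if len(found_neg) == 1 else 0,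
--             'intense', 1 if has_intense else 0,
--             'recs', 0 if has_would else 1)
-- ===== Notes on version B (the rewrite author's own statement) =====
-- stated objective: alternative
-- what changed: Replaces A's four list comprehensions (one over the input plus three membership scans building intermediate lists) with a single pass over the tokens maintaining a set of distinct negation words seen and two booleans.
import Mathlib
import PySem

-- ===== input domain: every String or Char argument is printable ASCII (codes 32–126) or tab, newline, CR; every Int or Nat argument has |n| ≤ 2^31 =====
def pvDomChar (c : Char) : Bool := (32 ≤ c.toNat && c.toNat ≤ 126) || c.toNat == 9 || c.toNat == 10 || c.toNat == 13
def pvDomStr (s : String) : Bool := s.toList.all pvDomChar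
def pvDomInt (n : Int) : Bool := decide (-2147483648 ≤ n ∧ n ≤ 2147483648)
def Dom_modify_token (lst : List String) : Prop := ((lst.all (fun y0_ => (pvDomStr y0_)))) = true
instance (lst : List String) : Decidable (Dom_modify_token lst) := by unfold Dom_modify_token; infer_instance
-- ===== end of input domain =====

-- B replaces A's four list comprehensions with a single pass maintaining a set of
-- distinct negation words seen plus two booleans (alternative decomposition, same cost).

-- module-level constants shared by both programs
def negWords : List String := ["no", "not", "never", "n't", "cannot"]
def intWords : List String := ["very", "really", "extremely", "absolutely", "highly"]

-- ===== PORT A =====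
def modify_token (lst : List String) : String × Int × String × Int × String × Int :=
  let list1 := lst.map PySem.Str.lower
  let list2 := negWords.filter (fun n => list1.contains n)
  let list3 := intWords.filter (fun n => list1.contains n)
  let list4 := list1.filter (fun n => n == "would")
  let tagg : Int := if list2.length = 1 then 2 else 0
  let taggg : Int := if list3.length > 0 then 1 else 0
  let tagggg : Int := if list4.length > 0 then 0 else 1
  ("negate", tagg, "intense", taggg, "recs", tagggg)

-- ===== PORT B =====
-- one loop step of Source B: lower the token, update the negation set and the two flags
def bStep (acc : PySem.Set String × Bool × Bool) (v : String) :
    PySem.Set String × Bool × Bool :=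
  let w := PySem.Str.lower v
  (if negWords.contains w then PySem.Set.add acc.1 w else acc.1,
   acc.2.1 || intWords.contains w,
   acc.2.2 || (w == "would"))

def modify_token_alt (lst : List String) : String × Int × String × Int × String × Int :=
  let st := lst.foldl bStep (PySem.Set.empty, false, false)
  ("negate", if PySem.Set.len st.1 = 1 then (2 : Int) else 0,
   "intense", if st.2.1 then (1 : Int) else 0,
   "recs", if st.2.2 then (0 : Int) else 1)

-- ===== PRECONDITION & SPEC =====
def Spec_modify_token (lst : List String) (out : String × Int × String × Int × String × Int) : Prop := out = modify_token_alt lst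
instance (lst : List String) (out : String × Int × String × Int × String × Int) : Decidable (Spec_modify_token lst out) := by unfold Spec_modify_token; infer_instance

-- ===== CLAIM (what is proved, stated in full; the proofs are below) =====
def Claim_equal_modify_token : Prop := ∀ (lst : List String), Dom_modify_token lst → Spec_modify_token lst (modify_token lst)

-- ===== LEMMAS AND PROOFS =====

theorem bFold_fst_mem (lst : List String) (acc : PySem.Set String × Bool × Bool)
    (x : String) :
    x ∈ (lst.foldl bStep acc).1 ↔
      x ∈ acc.1 ∨ (x ∈ negWords ∧ ∃ v ∈ lst, PySem.Str.lower v = x) := by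
  induction lst generalizing acc with
  | nil => simp
  | cons v t ih =>
    rw [List.foldl_cons, ih]
    by_cases h : negWords.contains (PySem.Str.lower v) = true
    · simp only [bStep, h, if_pos, PySem.Set.mem_add, List.mem_cons]
      constructor
      · rintro (⟨hs | he⟩ | hr)
        · exact Or.inl hs
        · exact Or.inr ⟨he ▸ (by simpa using h), v, Or.inl rfl, he.symm⟩
        · exact Or.inr ⟨hr.1, hr.2.imp (fun v ⟨hv, hl⟩ => ⟨Or.inr hv, hl⟩)⟩
      · rintro (hs | ⟨hn, v', hv', hl⟩)
        · exact Or.inl (Or.inl hs)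
        · rcases hv' with rfl | hv'
          · exact Or.inl (Or.inr hl.symm)
          · exact Or.inr ⟨hn, v', hv', hl⟩
    · simp only [bStep, h, if_neg, Bool.false_eq_true, not_false_iff,
        List.mem_cons]
      constructor
      · rintro (hs | hr)
        · exact Or.inl hs
        · exact Or.inr ⟨hr.1, hr.2.imp (fun v ⟨hv, hl⟩ => ⟨Or.inr hv, hl⟩)⟩
      · rintro (hs | ⟨hn, v', hv', hl⟩)
        · exact Or.inl hs
        · rcases hv' with rfl | hv'
          · exact absurd (by simpa using hl ▸ hn) (by simpa using h)
          · exact Or.inr ⟨hn, v', hv', hl⟩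

theorem bFold_fst_nodup (lst : List String) (acc : PySem.Set String × Bool × Bool)
    (h : acc.1.Nodup) : (lst.foldl bStep acc).1.Nodup := by
  induction lst generalizing acc with
  | nil => exact h
  | cons v t ih =>
    apply ih
    simp only [bStep]
    split
    · apply PySem.Set.nodup_add; exact h
    · exact h

theorem bFold_snd (lst : List String) (acc : PySem.Set String × Bool × Bool) :
    (lst.foldl bStep acc).2.1 =
      (acc.2.1 || lst.any (fun v => intWords.contains (PySem.Str.lower v))) := by
  induction lst generalizing acc with
  | nil => simp
  | cons v t ih => rw [List.foldl_cons, ih]; simp [bStep, Bool.or_assoc]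

theorem bFold_thd (lst : List String) (acc : PySem.Set String × Bool × Bool) :
    (lst.foldl bStep acc).2.2 =
      (acc.2.2 || lst.any (fun v => PySem.Str.lower v == "would")) := by
  induction lst generalizing acc with
  | nil => simp
  | cons v t ih => rw [List.foldl_cons, ih]; simp [bStep, Bool.or_assoc]

-- the set built by B's loop has the same length as A's list2
theorem len_eq (lst : List String) :
    (negWords.filter (fun n => (lst.map PySem.Str.lower).contains n)).length =
      (lst.foldl bStep (PySem.Set.empty, false, false)).1.length := by
  apply List.Perm.length_eq
  rw [List.perm_ext_iff_of_nodup]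
  · intro x
    rw [bFold_fst_mem, List.mem_filter]
    simp [PySem.Set.empty, List.mem_map, eq_comm]
  · exact (by decide : negWords.Nodup).filter _
  · exact bFold_fst_nodup _ _ (by simp [PySem.Set.empty])

-- ===== VERDICT (by name: the statement is the Claim_ definition above) =====
theorem modify_token_spec : Claim_equal_modify_token := by
  intro lst _
  show modify_token lst = modify_token_alt lst
  simp only [modify_token, modify_token_alt, PySem.Set.len]
  rw [bFold_snd, bFold_thd]
  simp only [← len_eq, Nat.cast_eq_one, Bool.false_or]
  have h3 : (intWords.filter (fun n => (lst.map PySem.Str.lower).contains n)).length > 0 ↔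
      (lst.any (fun v => intWords.contains (PySem.Str.lower v))) = true := by
    rw [gt_iff_lt, List.length_pos_iff_exists_mem]
    simp only [List.mem_filter, List.any_eq_true, List.contains_iff_mem, List.mem_map]
    constructor
    · rintro ⟨n, hn, v, hv, hl⟩; exact ⟨v, hv, hl ▸ hn⟩
    · rintro ⟨v, hv, h⟩; exact ⟨_, h, v, hv, rfl⟩
  have h4 : ((lst.map PySem.Str.lower).filter (fun n => n == "would")).length > 0 ↔
      (lst.any (fun v => PySem.Str.lower v == "would")) = true := by
    rw [gt_iff_lt, List.length_pos_iff_exists_mem]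
    simp only [List.mem_filter, List.any_eq_true, List.mem_map, beq_iff_eq]
    constructor
    · rintro ⟨n, ⟨v, hv, hl⟩, he⟩; exact ⟨v, hv, hl.trans he⟩
    · rintro ⟨v, hv, h⟩; exact ⟨"would", ⟨v, hv, h⟩, rfl⟩
  rw [if_congr h3 rfl rfl, if_congr h4 rfl rfl]
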